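-- pv_equiv track=rewrite | github.com/C0000kie/AdventOfCode2025 | dayThree.py | visualizeNum
-- ===== SOURCE A (Python) =====
-- def visualizeNum(batteryBank, indices):
--     formattedStr = ""
--     for i, digit in enumerate(batteryBank):
--         currDigit = str(digit)
--         if i in indices:
--             currDigit = "\x1B[31m" +  currDigit +  "\x1B[0m"
--         formattedStr += currDigit
--     return formattedStr
-- ===== SOURCE B (Python) =====
-- def visualizeNum(batteryBank, indices):
--     parts = [str(d) for d in batteryBank]
--     for idx in set(indices):
--         if 0 <= idx < len(parts):
--             parts[idx] = "\x1B[31m" + parts[idx] + "\x1B[0m"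
--     return "".join(parts)
-- ===== Notes on version B (the rewrite author's own statement) =====
-- stated objective: alternative
-- what changed: B builds the list of digit strings once, then walks the deduplicated highlight indices and wraps only the in-range positions before a single join, instead of scanning the whole indices list at every digit position and growing the string by repeated concatenation.
import Mathlib
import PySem

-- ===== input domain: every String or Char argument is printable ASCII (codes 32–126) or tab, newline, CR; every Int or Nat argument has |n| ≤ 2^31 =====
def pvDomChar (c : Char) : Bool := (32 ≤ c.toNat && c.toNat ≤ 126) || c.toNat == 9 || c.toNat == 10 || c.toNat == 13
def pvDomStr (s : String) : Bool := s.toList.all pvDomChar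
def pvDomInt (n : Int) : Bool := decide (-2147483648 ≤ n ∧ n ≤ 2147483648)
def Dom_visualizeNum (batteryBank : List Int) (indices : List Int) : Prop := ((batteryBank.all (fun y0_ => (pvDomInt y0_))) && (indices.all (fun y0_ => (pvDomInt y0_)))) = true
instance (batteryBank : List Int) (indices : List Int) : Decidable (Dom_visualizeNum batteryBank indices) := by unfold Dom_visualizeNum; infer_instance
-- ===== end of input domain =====

-- B builds the digit strings once and wraps only the (deduplicated, in-range) highlighted
-- positions, then joins once, instead of scanning `indices` at every digit position and
-- growing the string by repeated concatenation (objective: alternative decomposition).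

-- ===== PORT A =====
def visualizeNum (batteryBank : List Int) (indices : List Int) : String :=
  (PySem.List.enumerate batteryBank).foldl
    (fun formattedStr p =>
      let currDigit := PySem.Int.toStr p.2
      let currDigit := if indices.contains p.1
        then "\x1B[31m" ++ currDigit ++ "\x1B[0m"
        else currDigit
      formattedStr ++ currDigit) ""

-- ===== PORT B =====
def visualizeNum_alt (batteryBank : List Int) (indices : List Int) : String :=
  let parts := batteryBank.map PySem.Int.toStr
  let parts := (PySem.Set.ofList indices).foldl
    (fun ps idx =>
      if 0 ≤ idx ∧ idx < (ps.length : Int)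
        then PySem.List.pySetD ps idx ("\x1B[31m" ++ PySem.List.pyGetD ps idx "" ++ "\x1B[0m")
        else ps) parts
  PySem.Str.join "" parts

-- ===== PRECONDITION & SPEC =====
def Spec_visualizeNum (batteryBank : List Int) (indices : List Int) (out : String) : Prop := out = visualizeNum_alt batteryBank indices
instance (batteryBank : List Int) (indices : List Int) (out : String) : Decidable (Spec_visualizeNum batteryBank indices out) := by unfold Spec_visualizeNum; infer_instance

-- ===== CLAIM (what is proved, stated in full; the proofs are below) =====
def Claim_equal_visualizeNum : Prop := ∀ (batteryBank : List Int) (indices : List Int), Dom_visualizeNum batteryBank indices → Spec_visualizeNum batteryBank indices (visualizeNum batteryBank indices)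

-- ===== LEMMAS AND PROOFS =====

-- the ANSI wrapping both programs perform
def pvWrap (s : String) : String := "\x1B[31m" ++ s ++ "\x1B[0m"

-- the per-position string both programs produce
def pvGlyph (indices : List Int) (p : Int × Int) : String :=
  if indices.contains p.1 then pvWrap (PySem.Int.toStr p.2) else PySem.Int.toStr p.2

-- B's highlighting step, named for the proofs
def pvUpd (ps : List String) (idx : Int) : List String :=
  if 0 ≤ idx ∧ idx < (ps.length : Int)
    then PySem.List.pySetD ps idx ("\x1B[31m" ++ PySem.List.pyGetD ps idx "" ++ "\x1B[0m")
    else ps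

theorem pvUpd_getElem? (ps : List String) (idx : Int) (j : Nat) :
    (pvUpd ps idx)[j]? = if idx = (j : Int) then ps[j]?.map pvWrap else ps[j]? := by
  unfold pvUpd
  split_ifs with h he hf
  · obtain ⟨h0, hl⟩ := h
    subst he
    have hjlt : j < ps.length := by omega
    simp [PySem.List.pySetD_natCast, PySem.List.pyGetD_natCast, hjlt, pvWrap]
  · obtain ⟨h0, hl⟩ := h
    have hne : idx.toNat ≠ j := by omega
    rw [PySem.List.pySetD_of_nonneg ps _ h0, List.getElem?_set, if_neg hne]
  · subst hf
    have hz : ps.length ≤ j := by omega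
    simp [List.getElem?_eq_none hz]
  · rfl

theorem pvFold_getElem? (s : List Int) (hs : s.Nodup) (ps : List String) (j : Nat) :
    (s.foldl pvUpd ps)[j]? = if (j : Int) ∈ s then ps[j]?.map pvWrap else ps[j]? := by
  induction s generalizing ps with
  | nil => simp
  | cons a s ih =>
    have ha : a ∉ s := (List.nodup_cons.mp hs).1
    have hs' : s.Nodup := (List.nodup_cons.mp hs).2
    rw [List.foldl_cons, ih hs' (pvUpd ps a), pvUpd_getElem?]
    by_cases hm : (j : Int) ∈ s
    · have hne : ¬ (a = (j : Int)) := fun he => ha (he ▸ hm)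
      simp [hm, hne]
    · by_cases he : a = (j : Int)
      · simp [hm, he, List.mem_cons]
      · have hne' : ¬ ((j : Int) = a) := fun hh => he hh.symm
        simp [hm, he, hne', List.mem_cons]

-- B's mutated parts list IS the per-position glyph list
theorem pvParts_eq (batteryBank indices : List Int) :
    (PySem.Set.ofList indices).foldl pvUpd (batteryBank.map PySem.Int.toStr)
      = (PySem.List.enumerate batteryBank).map (pvGlyph indices) := by
  apply List.ext_getElem?
  intro j
  rw [pvFold_getElem? _ (PySem.Set.nodup_ofList indices), List.getElem?_map,
      List.getElem?_map, PySem.List.getElem?_enumerate]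
  have hmem : ((j : Int) ∈ PySem.Set.ofList indices) ↔ (j : Int) ∈ indices :=
    PySem.Set.mem_ofList indices (j : Int)
  cases hb : batteryBank[j]? with
  | none => simp
  | some x =>
    by_cases hm : (j : Int) ∈ indices
    · have hc : indices.contains ((0 : Int) + (j : Int)) = true := by
        simpa [List.contains_iff_mem] using hm
      simp [hmem, hm, pvGlyph]
    · have hc : indices.contains ((0 : Int) + (j : Int)) = false := by
        simpa [List.contains_iff_mem] using hm
      simp [hmem, hm, pvGlyph]

-- A's accumulating loop concatenates the glyphs
theorem pvFoldA (indices : List Int) (l : List (Int × Int)) (acc : String) :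
    (l.foldl (fun formattedStr p =>
        let currDigit := PySem.Int.toStr p.2
        let currDigit := if indices.contains p.1
          then "\x1B[31m" ++ currDigit ++ "\x1B[0m"
          else currDigit
        formattedStr ++ currDigit) acc).toList
      = acc.toList ++ (l.map (fun p => (pvGlyph indices p).toList)).flatten := by
  induction l generalizing acc with
  | nil => simp
  | cons p l ih =>
    rw [List.foldl_cons, ih]
    simp only [List.map_cons, List.flatten_cons]
    unfold pvGlyph pvWrap
    split_ifs <;> simp

-- joining lists of chars with the empty separator flattens
theorem pvFlatten_intersperse : ∀ (L : List (List Char)),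
    (List.intersperse ([] : List Char) L).flatten = L.flatten
  | [] => rfl
  | [_] => rfl
  | a :: b :: t => by
      have ih := pvFlatten_intersperse (b :: t)
      simp_all [List.intersperse]

-- joining strings with "" flattens their character lists
theorem pvJoin_toList (parts : List String) :
    (PySem.Str.join "" parts).toList = (parts.map String.toList).flatten := by
  rw [PySem.Str.toList_join]
  have h : ("" : String).toList = [] := rfl
  rw [h]
  simp [PySem.Chars.join, List.intercalate, pvFlatten_intersperse]

-- ===== VERDICT (by name: the statement is the Claim_ definition above) =====
theorem visualizeNum_spec : Claim_equal_visualizeNum := by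
  intro batteryBank indices _
  unfold Spec_visualizeNum
  have hAlt : visualizeNum_alt batteryBank indices
      = PySem.Str.join ""
          ((PySem.Set.ofList indices).foldl pvUpd (batteryBank.map PySem.Int.toStr)) := rfl
  have hA : (visualizeNum batteryBank indices).toList
      = ("" : String).toList
          ++ ((PySem.List.enumerate batteryBank).map
                (fun p => (pvGlyph indices p).toList)).flatten :=
    pvFoldA indices (PySem.List.enumerate batteryBank) ""
  have htl : (visualizeNum batteryBank indices).toList
      = (visualizeNum_alt batteryBank indices).toList := by
    rw [hAlt, pvParts_eq, pvJoin_toList, hA]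
    simp [List.map_map, Function.comp_def]
  have := congrArg String.ofList htl
  simpa [String.ofList_toList] using this
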